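-- pv_equiv track=rewrite | github.com/akimi-yano/algorithm | cf/A.XORinacci.py | xornachi
-- ===== SOURCE A (Python) =====
-- def xornachi(a,b,c):
--     prevprev = a
--     prev = b
--     if c == 0:
--         return prevprev
--     elif c == 1:
--         return  prev
--     else:
--         for i in range(2,c+1):
--             temp = prevprev ^ prev
--             prevprev = prev
--             prev = temp
--     return temp
-- ===== SOURCE B (Python) =====
-- def xornachi(a, b, c):
--     # XORinacci is periodic with period 3: a, b, a^b, a, b, ...
--     return (a, b, a ^ b)[c % 3]
-- ===== Notes on version B (the rewrite author's own statement) =====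
-- stated objective: faster
-- what changed: Replaces the O(c) XOR loop by the period-3 closed form that picks a, b or a^b according to c % 3.
import Mathlib
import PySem

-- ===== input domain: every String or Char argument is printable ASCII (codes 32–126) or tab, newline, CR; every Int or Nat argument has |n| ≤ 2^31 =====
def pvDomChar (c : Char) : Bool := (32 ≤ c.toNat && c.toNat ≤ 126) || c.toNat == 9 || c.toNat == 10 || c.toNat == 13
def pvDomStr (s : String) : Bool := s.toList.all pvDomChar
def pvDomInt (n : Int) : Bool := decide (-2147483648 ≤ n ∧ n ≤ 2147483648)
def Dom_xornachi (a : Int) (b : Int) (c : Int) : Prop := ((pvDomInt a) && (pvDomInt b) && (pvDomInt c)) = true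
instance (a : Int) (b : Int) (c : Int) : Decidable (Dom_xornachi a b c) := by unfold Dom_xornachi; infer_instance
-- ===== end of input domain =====

-- B replaces A's O(c) XOR loop by the O(1) period-3 closed form (c % 3 picks a, b or a ^ b).

-- ===== PORT A =====
-- The loop state is (prevprev, prev, temp); Python's `temp` is unbound before the first
-- iteration (A raises UnboundLocalError when c < 0 reaches `return temp`), so those inputs
-- are excluded by Pre_; the 0 in the initial state is never returned on Pre_.
def xornachi (a : Int) (b : Int) (c : Int) : Int :=
  let prevprev := a
  let prev := b
  if c = 0 then prevprev
  else if c = 1 then prev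
  else
    ((PySem.List.pyRange 2 (c + 1) 1).foldl
      (fun (st : Int × Int × Int) _ =>
        let temp := PySem.Int.bxor st.1 st.2.1
        (st.2.1, temp, temp))
      (prevprev, prev, 0)).2.2

-- ===== PORT B =====
-- Source B: return (a, b, a ^ b)[c % 3]
def xornachi_alt (a : Int) (b : Int) (c : Int) : Int :=
  let r := PySem.Int.mod c 3
  if r = 0 then a else if r = 1 then b else PySem.Int.bxor a b

-- ===== PRECONDITION & SPEC =====
-- Pre_ excludes c < 0, where A raises UnboundLocalError (loop body never runs, `temp` unbound).
def Pre_xornachi (a : Int) (b : Int) (c : Int) : Prop := 0 ≤ c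
instance (a : Int) (b : Int) (c : Int) : Decidable (Pre_xornachi a b c) := by unfold Pre_xornachi; infer_instance
def pvWitness_xornachi : Int × Int × Int := (3, 5, 7)

def Spec_xornachi (a : Int) (b : Int) (c : Int) (out : Int) : Prop := out = xornachi_alt a b c
instance (a : Int) (b : Int) (c : Int) (out : Int) : Decidable (Spec_xornachi a b c out) := by unfold Spec_xornachi; infer_instance

-- ===== CLAIM (what is proved, stated in full; the proofs are below) =====
def Claim_equal_xornachi : Prop := ∀ (a : Int) (b : Int) (c : Int), Dom_xornachi a b c → Pre_xornachi a b c → Spec_xornachi a b c (xornachi a b c)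

-- ===== LEMMAS AND PROOFS =====

theorem pv_bxor_eq_xor (a b : Int) : PySem.Int.bxor a b = Int.xor a b := by
  unfold PySem.Int.bxor Int.xor
  rcases a with m | m <;> rcases b with n | n <;> simp [Int.negSucc_eq] <;> omega

-- The XORinacci sequence.
def pvF (a b : Int) : Nat → Int
  | 0 => a
  | 1 => b
  | n + 2 => PySem.Int.bxor (pvF a b n) (pvF a b (n + 1))

theorem pv_nat_xor_cancel (m n : Nat) : n ^^^ (m ^^^ n) = m := by
  rw [Nat.xor_comm m n, ← Nat.xor_assoc, Nat.xor_self, Nat.zero_xor]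

theorem pv_bxor_cancel (x y : Int) : PySem.Int.bxor y (PySem.Int.bxor x y) = x := by
  rw [pv_bxor_eq_xor, pv_bxor_eq_xor]
  unfold Int.xor
  rcases x with m | m <;> rcases y with n | n <;>
    simp [Int.negSucc_eq, pv_nat_xor_cancel]

theorem pvF_period (a b : Int) (n : Nat) : pvF a b (n + 3) = pvF a b n := by
  show PySem.Int.bxor (pvF a b (n + 1)) (PySem.Int.bxor (pvF a b n) (pvF a b (n + 1))) = pvF a b n
  exact pv_bxor_cancel _ _

theorem pvF_mod3 (a b : Int) (n : Nat) : pvF a b n = pvF a b (n % 3) := by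
  induction n using Nat.strong_induction_on with
  | _ n ih =>
    match n, ih with
    | 0, _ => rfl
    | 1, _ => rfl
    | 2, _ => rfl
    | n + 3, ih =>
      rw [pvF_period]
      rw [ih n (by omega)]
      congr 1
      omega

-- A's loop over range(2, c+1) computes (pvF (n+1), pvF (n+2), pvF (n+2)) for c = n + 2.
theorem pv_loop (a b : Int) (n : Nat) :
    (PySem.List.pyRange 2 ((n : Int) + 2 + 1) 1).foldl
      (fun (st : Int × Int × Int) _ =>
        let temp := PySem.Int.bxor st.1 st.2.1
        (st.2.1, temp, temp))
      (a, b, 0)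
      = (pvF a b (n + 1), pvF a b (n + 2), pvF a b (n + 2)) := by
  induction n with
  | zero =>
    show List.foldl _ _ (PySem.List.pyRange 2 3 1) = _
    rw [show (PySem.List.pyRange 2 3 1) = [2] by decide]
    rfl
  | succ k ih =>
    have h2 : (2 : Int) ≤ (k : Int) + 2 + 1 := by omega
    have : ((k : Int) + 1 + 2 + 1) = ((k : Int) + 2 + 1) + 1 := by ring
    push_cast
    rw [this, PySem.List.pyRange_one_succ_right h2, List.foldl_append, ih]
    show (pvF a b (k + 2), PySem.Int.bxor (pvF a b (k + 1)) (pvF a b (k + 2)),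
          PySem.Int.bxor (pvF a b (k + 1)) (pvF a b (k + 2)))
        = (pvF a b (k + 2), pvF a b (k + 3), pvF a b (k + 3))
    rfl

theorem pv_xornachi_eq_pvF (a b : Int) (n : Nat) :
    xornachi a b ((n : Int) + 2) = pvF a b (n + 2) := by
  unfold xornachi
  have h0 : ((n : Int) + 2) ≠ 0 := by omega
  have h1 : ((n : Int) + 2) ≠ 1 := by omega
  simp only [h0, h1, if_false]
  rw [pv_loop a b n]

-- ===== VERDICT (by name: the statement is the Claim_ definition above) =====
theorem xornachi_spec : Claim_equal_xornachi := by
  intro a b c _ hpre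
  unfold Spec_xornachi
  unfold Pre_xornachi at hpre
  by_cases h0 : c = 0
  · subst h0; simp [xornachi, xornachi_alt]
  · by_cases h1 : c = 1
    · subst h1; simp [xornachi, xornachi_alt]
    · obtain ⟨n, hn⟩ : ∃ n : Nat, c = (n : Int) + 2 := ⟨(c - 2).toNat, by omega⟩
      subst hn
      rw [pv_xornachi_eq_pvF, pvF_mod3]
      unfold xornachi_alt
      have hmod : PySem.Int.mod ((n : Int) + 2) 3 = (((n + 2) % 3 : Nat) : Int) := by
        exact_mod_cast PySem.Int.mod_natCast (n + 2) 3
      rw [hmod]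
      rcases (show (n + 2) % 3 = 0 ∨ (n + 2) % 3 = 1 ∨ (n + 2) % 3 = 2 by omega) with h | h | h <;>
        rw [h] <;> simp [pvF]
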